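-- pv_equiv track=rewrite | github.com/MirkaIvanova/Projects | the-grammar-whisperer/helpers/parse_nlp_features2.py | parse_nlp_features2
-- ===== SOURCE A (Python) =====
-- def parse_nlp_features2(sentence_features):
--     # sentence_features = ast.literal_eval(sentence_features_str)
--     gender, number, person = [], [], []
--
--     for features in sentence_features:
--         if features in ("_", ""):
--             gender.append(".")
--             number.append(".")
--             person.append(".")
--             continue
--
--         g_val = n_val = p_val = "."
--         for pair in features.split("|"):
--             if "=" in pair:
--                 key, val = pair.split("=", 1)
--                 if key == "Gender":
--                     g_val = val or "."
--                 elif key == "Number":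
--                     n_val = val or "."
--                 elif key == "Person":
--                     p_val = val or "."
--         gender.append(g_val)
--         number.append(n_val)
--         person.append(p_val)
--
--     return gender, number, person
-- ===== SOURCE B (Python) =====
-- def parse_nlp_features2(sentence_features):
--     # Scan each features string's pairs from the RIGHT and return at the first
--     # matching key (last-wins falls out of reversed traversal + early return);
--     # build each of the three lists in its own pass.
--     def value_of(features, key):
--         for pair in reversed(features.split("|")):
--             if "=" in pair:
--                 k, v = pair.split("=", 1)
--                 if k == key:
--                     return v or "."
--         return "."
--
--     return (
--         [value_of(f, "Gender") for f in sentence_features],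
--         [value_of(f, "Number") for f in sentence_features],
--         [value_of(f, "Person") for f in sentence_features],
--     )
-- ===== Notes on version B (the rewrite author's own statement) =====
-- stated objective: alternative
-- what changed: B replaces A's single forward stateful scan (three mutable slots updated pair by pair) with a per-key backward scan with early exit: each pair list is traversed in reverse and the first match from the right is returned, so last-wins needs no state; the three output lists are built in three independent passes and the '_'/'' special case disappears.
import Mathlib
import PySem

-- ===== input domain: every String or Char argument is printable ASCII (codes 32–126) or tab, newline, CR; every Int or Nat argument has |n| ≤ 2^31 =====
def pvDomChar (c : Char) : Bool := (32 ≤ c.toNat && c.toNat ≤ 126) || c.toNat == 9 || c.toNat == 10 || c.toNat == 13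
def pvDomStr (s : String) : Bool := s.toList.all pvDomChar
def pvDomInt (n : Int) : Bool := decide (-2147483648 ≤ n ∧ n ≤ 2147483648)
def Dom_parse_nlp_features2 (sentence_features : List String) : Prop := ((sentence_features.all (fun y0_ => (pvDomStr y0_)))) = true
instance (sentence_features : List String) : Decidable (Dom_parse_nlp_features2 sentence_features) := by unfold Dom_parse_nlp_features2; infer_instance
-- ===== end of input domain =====

-- B replaces A's forward stateful scan with a per-key backward scan with early
-- exit (first match from the right = last-wins), three independent passes
-- (objective: alternative; same cost).

-- ===== PORT A =====
-- key, val = pair.split("=", 1); then the Gender/Number/Person branch chain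
def pvKV (st : String × String × String) (key val : String) : String × String × String :=
  if key = "Gender" then ((if val = "" then "." else val), st.2.1, st.2.2)
  else if key = "Number" then (st.1, (if val = "" then "." else val), st.2.2)
  else if key = "Person" then (st.1, st.2.1, (if val = "" then "." else val))
  else st

-- A's inner loop body: scan one 'pair', updating (g_val, n_val, p_val)
def pvAInner (st : String × String × String) (pair : String) : String × String × String :=
  if PySem.Str.isIn "=" pair then
    pvKV st (((PySem.Str.splitMax? pair "=" 1).getD []).headD "")
            ((((PySem.Str.splitMax? pair "=" 1).getD []).drop 1).headD "")
  else st

-- A's outer loop body: handle one 'features' string, appending to the three lists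
def pvAStep (acc : List String × List String × List String) (features : String) :
    List String × List String × List String :=
  if features = "_" ∨ features = "" then
    (acc.1 ++ ["."], acc.2.1 ++ ["."], acc.2.2 ++ ["."])
  else
    let st := ((PySem.Str.split? features "|").getD []).foldl pvAInner (".", ".", ".")
    (acc.1 ++ [st.1], acc.2.1 ++ [st.2.1], acc.2.2 ++ [st.2.2])

def parse_nlp_features2 (sentence_features : List String) :
    List String × List String × List String :=
  sentence_features.foldl pvAStep ([], [], [])

-- ===== PORT B =====
-- the 'for pair in reversed(...)' loop of value_of: first match from the left
-- of the (already reversed) pair list, early return; '.' if the loop falls off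
def pvFind (key : String) : List String → String
  | [] => "."
  | pair :: rest =>
    if PySem.Str.isIn "=" pair then
      let parts := (PySem.Str.splitMax? pair "=" 1).getD []
      if parts.headD "" = key then
        (if (parts.drop 1).headD "" = "" then "." else (parts.drop 1).headD "")
      else pvFind key rest
    else pvFind key rest

-- value_of(features, key)
def pvValueOf (features key : String) : String :=
  pvFind key ((PySem.Str.split? features "|").getD []).reverse

def parse_nlp_features2_alt (sentence_features : List String) :
    List String × List String × List String :=
  (sentence_features.map (fun f => pvValueOf f "Gender"),
   sentence_features.map (fun f => pvValueOf f "Number"),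
   sentence_features.map (fun f => pvValueOf f "Person"))

-- ===== PRECONDITION & SPEC =====
def Spec_parse_nlp_features2 (sentence_features : List String) (out : List String × List String × List String) : Prop := out = parse_nlp_features2_alt sentence_features
instance (sentence_features : List String) (out : List String × List String × List String) : Decidable (Spec_parse_nlp_features2 sentence_features out) := by unfold Spec_parse_nlp_features2; infer_instance

-- ===== CLAIM (what is proved, stated in full; the proofs are below) =====
def Claim_equal_parse_nlp_features2 : Prop := ∀ (sentence_features : List String), Dom_parse_nlp_features2 sentence_features → Spec_parse_nlp_features2 sentence_features (parse_nlp_features2 sentence_features)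

-- ===== LEMMAS AND PROOFS =====
-- pvFind with an explicit default (proof device: generalizes pvFind's '.')
def pvFindD (key d : String) : List String → String
  | [] => d
  | pair :: rest =>
    if PySem.Str.isIn "=" pair then
      let parts := (PySem.Str.splitMax? pair "=" 1).getD []
      if parts.headD "" = key then
        (if (parts.drop 1).headD "" = "" then "." else (parts.drop 1).headD "")
      else pvFindD key d rest
    else pvFindD key d rest

theorem pvFind_eq_findD (key : String) (l : List String) :
    pvFind key l = pvFindD key "." l := by
  induction l with
  | nil => rfl
  | cons p rest ih => simp only [pvFind, pvFindD]; split_ifs <;> simp [ih]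

-- early-exit scan splits over append
theorem pvFindD_append (key d : String) (l1 l2 : List String) :
    pvFindD key d (l1 ++ l2) = pvFindD key (pvFindD key d l2) l1 := by
  induction l1 with
  | nil => rfl
  | cons p rest ih => simp only [List.cons_append, pvFindD]; split_ifs <;> simp [ih]

-- one pair: A's state update seen through the three single-pair scans
theorem pvFindD_single (st : String × String × String) (p : String) :
    (pvFindD "Gender" st.1 [p], pvFindD "Number" st.2.1 [p], pvFindD "Person" st.2.2 [p])
      = pvAInner st p := by
  unfold pvFindD pvAInner pvKV
  split_ifs <;> simp_all [pvFindD]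

-- A's whole inner fold projects to the three backward scans of B
theorem pvFold_eq (pairs : List String) (st : String × String × String) :
    pairs.foldl pvAInner st
      = (pvFindD "Gender" st.1 pairs.reverse,
         pvFindD "Number" st.2.1 pairs.reverse,
         pvFindD "Person" st.2.2 pairs.reverse) := by
  induction pairs generalizing st with
  | nil => rfl
  | cons p rest ih =>
      simp only [List.foldl_cons, List.reverse_cons, pvFindD_append, ih,
        ← pvFindD_single st p]

-- per-string agreement
theorem pvStep_eq (acc : List String × List String × List String) (f : String) :
    pvAStep acc f =
      (acc.1 ++ [pvValueOf f "Gender"],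
       acc.2.1 ++ [pvValueOf f "Number"],
       acc.2.2 ++ [pvValueOf f "Person"]) := by
  by_cases h : f = "_" ∨ f = ""
  · rcases h with h | h <;> subst h <;> simp [pvAStep] <;> decide
  · simp [pvAStep, h, pvFold_eq, pvValueOf, pvFind_eq_findD]

theorem pvOuter (sf : List String) (g n p : List String) :
    sf.foldl pvAStep (g, n, p) =
      (g ++ sf.map (fun f => pvValueOf f "Gender"),
       n ++ sf.map (fun f => pvValueOf f "Number"),
       p ++ sf.map (fun f => pvValueOf f "Person")) := by
  induction sf generalizing g n p with
  | nil => simp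
  | cons f rest ih =>
      simp only [List.foldl_cons, pvStep_eq, List.map_cons]
      rw [ih]; simp

-- ===== VERDICT (by name: the statement is the Claim_ definition above) =====
theorem parse_nlp_features2_spec : Claim_equal_parse_nlp_features2 := by
  intro sf _
  show parse_nlp_features2 sf = parse_nlp_features2_alt sf
  simp [parse_nlp_features2, parse_nlp_features2_alt, pvOuter]
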